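-- pv_equiv track=rewrite | github.com/paiml/depyler | examples/hard_realworld_json_build.py | json_array_strs
-- ===== SOURCE A (Python) =====
-- def escape_json_str(text: str) -> str:
--     """Escape special characters for JSON string encoding."""
--     result: str = ""
--     idx: int = 0
--     while idx < len(text):
--         ch: str = text[idx]
--         if ch == '"':
--             result = result + '\\"'
--         elif ch == "\\":
--             result = result + "\\\\"
--         elif ch == "\n":
--             result = result + "\\n"
--         elif ch == "\t":
--             result = result + "\\t"
--         else:
--             result = result + ch
--         idx = idx + 1
--     return result
--
-- def wrap_json_str(value: str) -> str:
--     """Wrap a value as a JSON string with quotes."""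
--     escaped: str = escape_json_str(value)
--     return '"' + escaped + '"'
--
-- def json_array_strs(values: list[str]) -> str:
--     """Serialize a list of strings as JSON array."""
--     result: str = "["
--     idx: int = 0
--     while idx < len(values):
--         if idx > 0:
--             result = result + ", "
--         wrapped: str = wrap_json_str(values[idx])
--         result = result + wrapped
--         idx = idx + 1
--     result = result + "]"
--     return result
-- ===== SOURCE B (Python) =====
-- def escape_json_str(text: str) -> str:
--     """Escape special characters for JSON string encoding."""
--     # backslash must be replaced first
--     return (text.replace("\\", "\\\\")
--                 .replace('"', '\\"')
--                 .replace("\n", "\\n")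
--                 .replace("\t", "\\t"))
--
-- def wrap_json_str(value: str) -> str:
--     """Wrap a value as a JSON string with quotes."""
--     return '"' + escape_json_str(value) + '"'
--
-- def json_array_strs(values: list[str]) -> str:
--     """Serialize a list of strings as JSON array."""
--     return "[" + ", ".join(wrap_json_str(v) for v in values) + "]"
-- ===== Notes on version B (the rewrite author's own statement) =====
-- stated objective: faster
-- what changed: Replaces the index-driven per-character while loops that build the result by repeated string concatenation with chained str.replace passes (backslash first) and ', '.join over wrapped values, removing the idx>0 separator branch.
import Mathlib
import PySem

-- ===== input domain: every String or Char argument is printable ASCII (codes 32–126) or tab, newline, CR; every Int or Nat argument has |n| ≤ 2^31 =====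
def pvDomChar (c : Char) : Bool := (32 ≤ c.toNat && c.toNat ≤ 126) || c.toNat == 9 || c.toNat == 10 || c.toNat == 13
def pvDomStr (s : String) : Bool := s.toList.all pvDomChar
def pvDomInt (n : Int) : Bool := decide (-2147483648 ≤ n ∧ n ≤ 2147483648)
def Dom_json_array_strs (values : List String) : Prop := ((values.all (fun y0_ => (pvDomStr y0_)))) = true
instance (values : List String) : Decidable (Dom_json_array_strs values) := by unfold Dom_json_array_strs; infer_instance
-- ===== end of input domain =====

-- B changes structure only (chained replace passes + join instead of index loops); equality holds for all inputs.

-- ===== PORT A =====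
-- escape_json_str: the while loop over idx reading text[idx] in order, as a fold over the chars
-- (string facts are proved on the List Char side, per the PySem convention).
def escAChars (cs : List Char) : List Char :=
  cs.foldl (fun result ch =>
    if ch = '"' then result ++ ['\\', '"']
    else if ch = '\\' then result ++ ['\\', '\\']
    else if ch = '\n' then result ++ ['\\', 'n']
    else if ch = '\t' then result ++ ['\\', 't']
    else result ++ [ch]) []

def escape_json_str (text : String) : String := String.ofList (escAChars text.toList)

def wrap_json_str (value : String) : String :=
  String.ofList ('"' :: (escape_json_str value).toList ++ ['"'])

-- the while loop over idx with the `idx > 0` separator branch, as structural recursion carrying idx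
def jsonGoA : List String → Nat → List Char → List Char
  | [], _, result => result
  | v :: rest, idx, result =>
      jsonGoA rest (idx + 1)
        ((if idx > 0 then result ++ [',', ' '] else result) ++ (wrap_json_str v).toList)

def json_array_strs (values : List String) : String :=
  String.ofList (jsonGoA values 0 ['['] ++ [']'])

-- ===== PORT B =====
def escape_json_str_alt (text : String) : String :=
  PySem.Str.replace (PySem.Str.replace (PySem.Str.replace (PySem.Str.replace
    text "\\" "\\\\") "\"" "\\\"") "\n" "\\n") "\t" "\\t"

def wrap_json_str_alt (value : String) : String :=
  String.ofList ('"' :: (escape_json_str_alt value).toList ++ ['"'])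

def json_array_strs_alt (values : List String) : String :=
  String.ofList ('[' :: (PySem.Str.join ", " (values.map wrap_json_str_alt)).toList ++ [']'])

-- ===== PRECONDITION & SPEC =====
def Spec_json_array_strs (values : List String) (out : String) : Prop := out = json_array_strs_alt values
instance (values : List String) (out : String) : Decidable (Spec_json_array_strs values out) := by unfold Spec_json_array_strs; infer_instance

-- ===== CLAIM (what is proved, stated in full; the proofs are below) =====
def Claim_equal_json_array_strs : Prop := ∀ (values : List String), Dom_json_array_strs values → Spec_json_array_strs values (json_array_strs values)

-- ===== LEMMAS AND PROOFS =====

-- the per-character substitution both escapes amount to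
def escChar (c : Char) : List Char :=
  if c = '"' then ['\\', '"']
  else if c = '\\' then ['\\', '\\']
  else if c = '\n' then ['\\', 'n']
  else if c = '\t' then ['\\', 't']
  else [c]

theorem escAChars_eq_flatMap (cs : List Char) : escAChars cs = cs.flatMap escChar := by
  have h := PySem.List.foldl_append_eq_flatMap (g := escChar) (l := cs) (acc := ([] : List Char))
  unfold escAChars
  rw [PySem.List.foldl_congr_mem (g := fun acc c => acc ++ escChar c)]
  · simpa using h
  · intro acc x _
    unfold escChar
    split_ifs <;> rfl

-- one-char-pattern replace is per-character substitution
theorem replace_go_single (a : Char) (ns : List Char) :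
    ∀ (l : List Char) (fuel : Nat) (acc : List Char), l.length ≤ fuel →
      PySem.Chars.replace.go [a] ns fuel l acc
        = acc.reverse ++ l.flatMap (fun c => if c = a then ns else [c]) := by
  intro l
  induction l with
  | nil =>
      intro fuel acc _
      cases fuel <;> simp [PySem.Chars.replace.go]
  | cons c t ih =>
      intro fuel acc hle
      cases fuel with
      | zero => simp at hle
      | succ fuel =>
        by_cases hc : c = a
        · have hpre : List.isPrefixOf [a] (c :: t) = true := by
            simp [List.isPrefixOf, hc]
          rw [PySem.Chars.replace.go, if_pos hpre]
          have := ih fuel (ns.reverse ++ acc) (by simpa using Nat.lt_succ_iff.mp (by simpa using hle))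
          simp only [List.length_cons] at hle
          rw [show List.drop (List.length [a]) (c :: t) = t by simp]
          rw [ih fuel (ns.reverse ++ acc) (by omega)]
          simp [hc]
        · have hpre : List.isPrefixOf [a] (c :: t) = false := by
            simp [List.isPrefixOf]
            intro h; exact absurd h.symm hc
          rw [PySem.Chars.replace.go, if_neg (by simp [hpre])]
          simp only [List.length_cons] at hle
          rw [ih fuel (c :: acc) (by omega)]
          simp [hc]

theorem replace_single (a : Char) (ns cs : List Char) :
    PySem.Chars.replace cs [a] ns = cs.flatMap (fun c => if c = a then ns else [c]) := by
  unfold PySem.Chars.replace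
  rw [if_neg (by simp)]
  simpa using replace_go_single a ns cs cs.length [] le_rfl

theorem escape_eq (v : String) : (escape_json_str_alt v).toList = escAChars v.toList := by
  rw [escAChars_eq_flatMap]
  unfold escape_json_str_alt
  have hb : "\\".toList = ['\\'] := rfl
  have hbb : "\\\\".toList = ['\\', '\\'] := rfl
  have hq : "\"".toList = ['"'] := rfl
  have hbq : "\\\"".toList = ['\\', '"'] := rfl
  have hn : "\n".toList = ['\n'] := rfl
  have hbn : "\\n".toList = ['\\', 'n'] := rfl
  have ht : "\t".toList = ['\t'] := rfl
  have hbt : "\\t".toList = ['\\', 't'] := rfl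
  simp only [PySem.Str.toList_replace, hb, hbb, hq, hbq, hn, hbn, ht, hbt, replace_single]
  rw [List.flatMap_assoc, List.flatMap_assoc, List.flatMap_assoc]
  apply List.flatMap_congr
  intro c _
  unfold escChar
  by_cases h1 : c = '"' <;> by_cases h2 : c = '\\' <;> by_cases h3 : c = '\n' <;>
    by_cases h4 : c = '\t' <;> simp_all

theorem wrap_eq (v : String) : wrap_json_str v = wrap_json_str_alt v := by
  unfold wrap_json_str wrap_json_str_alt escape_json_str
  rw [escape_eq, String.toList_ofList]

theorem jsonGoA_pos :
    ∀ (rest : List String) (n : Nat) (acc : List Char),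
      jsonGoA rest (n + 1) acc
        = acc ++ rest.flatMap (fun v => [',', ' '] ++ (wrap_json_str v).toList) := by
  intro rest
  induction rest with
  | nil => intro n acc; simp [jsonGoA]
  | cons v t ih =>
      intro n acc
      rw [jsonGoA, if_pos (Nat.succ_pos n), ih]
      simp

theorem join_cons (sep : List Char) (x : List Char) (l : List (List Char)) :
    PySem.Chars.join sep (x :: l) = x ++ l.flatMap (fun y => sep ++ y) := by
  induction l generalizing x with
  | nil => simp [PySem.Chars.join, List.intercalate]
  | cons y t ih =>
      rw [PySem.Chars.join_cons_cons, ih]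
      simp

-- ===== VERDICT (by name: the statement is the Claim_ definition above) =====
theorem json_array_strs_spec : Claim_equal_json_array_strs := by
  intro values _
  show json_array_strs values = json_array_strs_alt values
  unfold json_array_strs json_array_strs_alt
  congr 1
  cases values with
  | nil => simp [jsonGoA, PySem.Str.join, PySem.Chars.join, List.intercalate]
  | cons v t =>
      rw [jsonGoA, if_neg (by simp), jsonGoA_pos]
      have : (PySem.Str.join ", " ((v :: t).map wrap_json_str_alt)).toList
          = (wrap_json_str_alt v).toList
            ++ t.flatMap (fun w => [',', ' '] ++ (wrap_json_str_alt w).toList) := by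
        simp only [PySem.Str.join, List.map_cons, String.toList_ofList]
        rw [join_cons]
        simp [List.flatMap_map]
      rw [this, wrap_eq]
      have hflat : t.flatMap (fun w => [',', ' '] ++ (wrap_json_str_alt w).toList)
          = t.flatMap (fun w => [',', ' '] ++ (wrap_json_str w).toList) := by
        apply List.flatMap_congr
        intro w _
        rw [wrap_eq]
      rw [hflat]
      simp
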